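-- pv_equiv track=rewrite | github.com/tyshchenko-artem/codewars-practice | rearange_num_to_get_maximum.py | max_redigit
-- ===== SOURCE A (Python) =====
-- def max_redigit(num:int):
--     '''Function takes one positive three digit integer and rearranges its digits to get maximum possible number.
--     Assume that argument is integer. Return None if argument is not valid.'''
--     try:
--         string = str(num)
--         if len(string) < 3:
--             return None
--         elif len(string) > 3:
--             return None
--         create_list_of_int = []
--         create_list_of_strings = []
--         for letter in string:
--             create_list_of_int.append(int(letter))
--         reverse = sorted(create_list_of_int, reverse=True)
--         for i in reverse:
--             create_list_of_strings.append(str(i))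
--         create_string = ''.join(create_list_of_strings)
--         return int(create_string)
--     except ValueError:
--         return None
-- ===== SOURCE B (Python) =====
-- def max_redigit(num: int):
--     '''Rearrange the digits of a three digit integer to get the maximum number.
--     Counting (bucket) emission instead of a comparison sort; None on invalid input.'''
--     s = str(num)
--     if len(s) != 3:
--         return None
--     counts = [0] * 10
--     for ch in s:
--         if not ch.isdigit():
--             return None
--         counts[int(ch)] += 1
--     return int(''.join(str(d) * counts[d] for d in range(9, -1, -1)))
-- ===== Notes on version B (the rewrite author's own statement) =====
-- stated objective: alternative
-- what changed: Replaces A's reverse comparison sort over an intermediate int list (plus a second string-building loop) with a single counting pass into a per-digit frequency table and a bucket emission from the highest digit downward; the length gate and the None result on non-digit characters are kept.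
import Mathlib
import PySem

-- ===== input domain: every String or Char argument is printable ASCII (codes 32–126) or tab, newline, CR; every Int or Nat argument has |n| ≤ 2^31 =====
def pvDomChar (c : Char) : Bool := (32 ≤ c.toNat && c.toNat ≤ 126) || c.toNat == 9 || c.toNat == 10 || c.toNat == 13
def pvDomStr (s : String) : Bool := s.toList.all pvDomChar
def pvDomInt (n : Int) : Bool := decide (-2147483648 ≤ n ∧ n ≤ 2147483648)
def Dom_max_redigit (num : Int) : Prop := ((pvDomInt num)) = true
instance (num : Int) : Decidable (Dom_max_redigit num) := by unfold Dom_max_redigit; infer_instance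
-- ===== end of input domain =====

-- B replaces A's comparison sort of the three digits by a counting/bucket emission
-- (frequency table indexed by digit, emitted from 9 down to 0); same None gating, same results.

-- ===== PORT A =====
-- the 'for letter in string' loop building create_list_of_int; int(letter) raising ValueError
-- aborts the function (caught → None), modelled by the Option accumulator
def pvAloop (cs : List Char) : Option (List Int) :=
  cs.foldl (fun acc letter =>
    match acc with
    | none => none
    | some l =>
      match PySem.Int.ofChars? [letter] with
      | none => none
      | some v => some (l ++ [v])) (some [])

-- sorted(..., reverse=True), the str(i)-appending loop, ''.join, int(...)
def pvAfinish (create_list_of_int : List Int) : Option Int :=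
  let reverse := PySem.List.sorted create_list_of_int (fun i => i) true
  let create_list_of_strings :=
    reverse.foldl (fun acc i => acc ++ [PySem.Int.toChars i]) ([] : List (List Char))
  let create_string := PySem.Chars.join [] create_list_of_strings
  match PySem.Int.ofChars? create_string with
  | none => none
  | some r => some r

def max_redigit (num : Int) : Option Int :=
  let string := PySem.Int.toChars num
  if string.length < 3 then none
  else if string.length > 3 then none
  else
    match pvAloop string with
    | none => none
    | some create_list_of_int => pvAfinish create_list_of_int

-- ===== PORT B =====
-- the counting loop: 'if not ch.isdigit(): return None' then 'counts[ord(ch) - ord('0')] += 1'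
def pvBloop (cs : List Char) : Option (List Int) :=
  cs.foldl (fun acc ch =>
    match acc with
    | none => none
    | some counts =>
      if PySem.Chars.isdigit ch then
        some (counts.set (ch.toNat - 48) (counts.getD (ch.toNat - 48) 0 + 1))
      else none) (some (List.replicate 10 (0 : Int)))

-- ''.join(str(d) * counts[d] for d in range(9, -1, -1))
def pvBemit (counts : List Int) : List Char :=
  PySem.Chars.join []
    ((PySem.List.pyRange 9 (-1) (-1)).map
      (fun d => PySem.List.pyRepeat (PySem.Int.toChars d) (PySem.List.pyGetD counts d 0)))

def max_redigit_alt (num : Int) : Option Int :=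
  let s := PySem.Int.toChars num
  if s.length ≠ 3 then none
  else
    match pvBloop s with
    | none => none
    | some counts => PySem.Int.ofChars? (pvBemit counts)  -- int(...): never a ValueError here (three digit chars)

-- ===== PRECONDITION & SPEC =====
def Spec_max_redigit (num : Int) (out : Option Int) : Prop := out = max_redigit_alt num
instance (num : Int) (out : Option Int) : Decidable (Spec_max_redigit num out) := by unfold Spec_max_redigit; infer_instance

-- ===== CLAIM (what is proved, stated in full; the proofs are below) =====
def Claim_equal_max_redigit : Prop := ∀ (num : Int), Dom_max_redigit num → Spec_max_redigit num (max_redigit num)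

-- ===== LEMMAS AND PROOFS =====

-- every character str(num) can produce: '-' or a decimal digit
def pvAllowed : List Char := ['-','0','1','2','3','4','5','6','7','8','9']

lemma pvDigitChar_mem (m : Nat) (h : m < 10) : Nat.digitChar m ∈ pvAllowed := by
  interval_cases m <;> decide

lemma pvToDigitsCore_mem (f : Nat) : ∀ (n : Nat) (acc : List Char),
    (∀ c ∈ acc, c ∈ pvAllowed) → ∀ c ∈ Nat.toDigitsCore 10 f n acc, c ∈ pvAllowed := by
  induction f with
  | zero =>
    intro n acc hacc c hc
    simpa [Nat.toDigitsCore] using hacc c (by simpa [Nat.toDigitsCore] using hc)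
  | succ f ih =>
    intro n acc hacc c hc
    have hd : Nat.digitChar (n % 10) ∈ pvAllowed :=
      pvDigitChar_mem _ (Nat.mod_lt _ (by norm_num))
    rw [Nat.toDigitsCore] at hc
    by_cases h0 : n / 10 = 0
    · simp only [h0, if_pos] at hc
      rcases List.mem_cons.mp hc with hc | hc
      · simpa [hc] using hd
      · exact hacc c hc
    · simp only [h0, if_false] at hc
      exact ih _ _ (by
        intro x hx
        rcases List.mem_cons.mp hx with hx | hx
        · simpa [hx] using hd
        · exact hacc x hx) c hc

lemma pvToChars_mem (num : Int) : ∀ c ∈ PySem.Int.toChars num, c ∈ pvAllowed := by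
  intro c hc
  unfold PySem.Int.toChars at hc
  split at hc
  · rcases List.mem_cons.mp hc with hc | hc
    · simp [hc, pvAllowed]
    · exact pvToDigitsCore_mem _ _ _ (by simp) c hc
  · exact pvToDigitsCore_mem _ _ _ (by simp) c hc

-- the post-gate computations of A and B agree on every 3-character string over pvAllowed:
-- checked exhaustively (11³ cases) by kernel evaluation
def pvKey : Bool :=
  pvAllowed.all fun a => pvAllowed.all fun b => pvAllowed.all fun c =>
    (match pvAloop [a,b,c] with | none => none | some l => pvAfinish l)
    == (match pvBloop [a,b,c] with | none => none | some cnt => PySem.Int.ofChars? (pvBemit cnt))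

set_option maxRecDepth 4000 in
lemma pvKey_true : pvKey = true := by decide

lemma pvKey_prop : ∀ a ∈ pvAllowed, ∀ b ∈ pvAllowed, ∀ c ∈ pvAllowed,
    (match pvAloop [a,b,c] with | none => none | some l => pvAfinish l)
    = (match pvBloop [a,b,c] with | none => none | some cnt => PySem.Int.ofChars? (pvBemit cnt)) := by
  have h := pvKey_true
  simp only [pvKey, List.all_eq_true, beq_iff_eq] at h
  exact h

-- ===== VERDICT (by name: the statement is the Claim_ definition above) =====
theorem max_redigit_spec : Claim_equal_max_redigit := by
  intro num _
  unfold Spec_max_redigit max_redigit max_redigit_alt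
  simp only []
  by_cases h : (PySem.Int.toChars num).length = 3
  · obtain ⟨a, b, c, habc⟩ := List.length_eq_three.mp h
    have hma := pvToChars_mem num a (by rw [habc]; simp)
    have hmb := pvToChars_mem num b (by rw [habc]; simp)
    have hmc := pvToChars_mem num c (by rw [habc]; simp)
    rw [habc]
    norm_num
    exact pvKey_prop a hma b hmb c hmc
  · rcases Nat.lt_or_ge (PySem.Int.toChars num).length 3 with hl | hl
    · simp [hl, h]
    · have hg : 3 < (PySem.Int.toChars num).length := by omega
      simp [hg, h, Nat.lt_asymm hg]
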